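-- pv_equiv track=rewrite | github.com/Juaaang/pyc_algorithm | 1493.py | new_method1
-- ===== SOURCE A (Python) =====
-- def new_method1(a, b):
--     x = y = point = 1
--     while True:
--         if x == a and y == b:
--             return point
--         if y == 1:
--             y += x
--             x = 1
--         else:
--             y -= 1
--             x += 1
--         point+= 1
-- ===== SOURCE B (Python) =====
-- def new_method1(a, b):
--     s = a + b
--     return (s - 2) * (s - 1) // 2 + a
-- ===== Notes on version B (the rewrite author's own statement) =====
-- stated objective: faster
-- what changed: Replaced the step-by-step diagonal walk (a loop advancing one cell per iteration) by the closed-form triangular-number formula (s-2)(s-1)/2 + a with s = a+b.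
import Mathlib
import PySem

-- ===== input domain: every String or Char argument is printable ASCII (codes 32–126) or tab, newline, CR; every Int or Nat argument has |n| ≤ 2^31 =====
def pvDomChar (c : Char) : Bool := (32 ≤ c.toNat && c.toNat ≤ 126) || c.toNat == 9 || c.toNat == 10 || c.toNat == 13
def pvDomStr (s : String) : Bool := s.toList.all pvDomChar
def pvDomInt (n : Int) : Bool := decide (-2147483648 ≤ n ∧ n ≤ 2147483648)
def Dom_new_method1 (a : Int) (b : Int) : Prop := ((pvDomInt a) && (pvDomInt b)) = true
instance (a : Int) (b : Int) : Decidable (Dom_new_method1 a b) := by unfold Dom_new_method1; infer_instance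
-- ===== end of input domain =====

-- B replaces A's one-cell-at-a-time diagonal walk by the closed-form formula (s-2)(s-1)//2 + a (s = a+b): O(1) instead of O((a+b)^2).


-- ===== PORT A =====
-- A's 'while True' loop, transliterated as fuel recursion over the same state (x, y, point);
-- the fuel (a+b)^2 + 1 is only a totality guard: under Pre_ the loop hits (a, b) well within it.
def newMethod1Loop (a : Int) (b : Int) : Nat → Int → Int → Int → Int
  | 0, _, _, _ => 0
  | n + 1, x, y, point =>
    if x = a ∧ y = b then point
    else if y = 1 then newMethod1Loop a b n 1 (y + x) (point + 1)
    else newMethod1Loop a b n (x + 1) (y - 1) (point + 1)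

def new_method1 (a : Int) (b : Int) : Int :=
  newMethod1Loop a b (((a + b) * (a + b)).toNat + 1) 1 1 1

-- ===== PORT B =====
def new_method1_alt (a : Int) (b : Int) : Int :=
  PySem.Int.floordiv ((a + b - 2) * (a + b - 1)) 2 + a

-- ===== PRECONDITION & SPEC =====
-- A's loop never returns (runs forever) unless a ≥ 1 and b ≥ 1: those inputs are excluded.
def Pre_new_method1 (a : Int) (b : Int) : Prop := 1 ≤ a ∧ 1 ≤ b
instance (a : Int) (b : Int) : Decidable (Pre_new_method1 a b) := by unfold Pre_new_method1; infer_instance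
def pvWitness_new_method1 : Int × Int := (3, 2)

def Spec_new_method1 (a : Int) (b : Int) (out : Int) : Prop := out = new_method1_alt a b
instance (a : Int) (b : Int) (out : Int) : Decidable (Spec_new_method1 a b out) := by unfold Spec_new_method1; infer_instance

-- ===== CLAIM (what is proved, stated in full; the proofs are below) =====
def Claim_equal_new_method1 : Prop := ∀ (a : Int) (b : Int), Dom_new_method1 a b → Pre_new_method1 a b → Spec_new_method1 a b (new_method1 a b)

-- ===== LEMMAS AND PROOFS =====

-- (s-2)(s-1) is even, so the floor division in B is exact: 2 * alt = (s-2)(s-1) + 2a.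
lemma two_mul_alt (a b : Int) : 2 * new_method1_alt a b = (a + b - 2) * (a + b - 1) + 2 * a := by
  obtain ⟨r, hr⟩ := Int.even_mul_succ_self (a + b - 2)
  have hm : (a + b - 2) * (a + b - 1) = r + r := by linarith [hr, (by ring : (a + b - 2) * ((a + b - 2) + 1) = (a + b - 2) * (a + b - 1))]
  unfold new_method1_alt
  rw [PySem.Int.floordiv_eq_ediv_of_pos (by omega), hm]
  omega

lemma alt_pos (a b : Int) (ha : 1 ≤ a) (hb : 1 ≤ b) : 1 ≤ new_method1_alt a b := by
  have h := two_mul_alt a b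
  nlinarith [mul_nonneg (by omega : (0:Int) ≤ a + b - 2) (by omega : (0:Int) ≤ a + b - 1)]

-- alt is injective on positive pairs (the diagonal ranges are disjoint).
lemma alt_inj (x y a b : Int) (hx : 1 ≤ x) (hy : 1 ≤ y) (ha : 1 ≤ a) (hb : 1 ≤ b)
    (h : new_method1_alt x y = new_method1_alt a b) : x = a ∧ y = b := by
  have h1 := two_mul_alt x y
  have h2 := two_mul_alt a b
  rcases lt_trichotomy (x + y) (a + b) with hlt | heq | hgt
  · exfalso; nlinarith
  · constructor
    · have : (x + y - 2) * (x + y - 1) = (a + b - 2) * (a + b - 1) := by rw [heq]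
      omega
    · have : (x + y - 2) * (x + y - 1) = (a + b - 2) * (a + b - 1) := by rw [heq]
      omega
  · exfalso; nlinarith

-- one loop step advances the index by exactly 1
lemma alt_step_wrap (x : Int) : new_method1_alt 1 (1 + x) = new_method1_alt x 1 + 1 := by
  have h1 := two_mul_alt 1 (1 + x)
  have h2 := two_mul_alt x 1
  nlinarith

lemma alt_step_diag (x y : Int) : new_method1_alt (x + 1) (y - 1) = new_method1_alt x y + 1 := by
  have h1 := two_mul_alt (x + 1) (y - 1)
  have h2 := two_mul_alt x y
  nlinarith

lemma loop_eq (a b : Int) (ha : 1 ≤ a) (hb : 1 ≤ b) :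
    ∀ (n : Nat) (x y p : Int), 1 ≤ x → 1 ≤ y →
      new_method1_alt x y ≤ new_method1_alt a b →
      new_method1_alt a b - new_method1_alt x y < (n : Int) →
      newMethod1Loop a b n x y p = p + (new_method1_alt a b - new_method1_alt x y) := by
  intro n
  induction n with
  | zero => intro x y p _ _ _ hlt; exfalso; simp at hlt; omega
  | succ n ih =>
    intro x y p hx hy hle hlt
    by_cases hab : x = a ∧ y = b
    · obtain ⟨h1, h2⟩ := hab
      subst h1; subst h2
      simp [newMethod1Loop]
    · have hne : new_method1_alt x y ≠ new_method1_alt a b := fun h => hab (alt_inj x y a b hx hy ha hb h)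
      have hstrict : new_method1_alt x y + 1 ≤ new_method1_alt a b := by omega
      by_cases hy1 : y = 1
      · subst hy1
        have hstep := alt_step_wrap x
        rw [show newMethod1Loop a b (n + 1) x 1 p = newMethod1Loop a b n 1 (1 + x) (p + 1) by
              simp [newMethod1Loop, hab]]
        rw [ih 1 (1 + x) (p + 1) le_rfl (by omega) (by omega) (by push_cast at hlt ⊢; omega)]
        omega
      · have hstep := alt_step_diag x y
        rw [show newMethod1Loop a b (n + 1) x y p = newMethod1Loop a b n (x + 1) (y - 1) (p + 1) by
              simp [newMethod1Loop, hab, hy1]]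
        rw [ih (x + 1) (y - 1) (p + 1) (by omega) (by omega) (by omega) (by push_cast at hlt ⊢; omega)]
        omega

lemma alt_one_one : new_method1_alt 1 1 = 1 := by decide

lemma alt_le_sq (a b : Int) (ha : 1 ≤ a) (hb : 1 ≤ b) :
    new_method1_alt a b ≤ (a + b) * (a + b) + 1 := by
  have h := two_mul_alt a b
  nlinarith

-- ===== VERDICT (by name: the statement is the Claim_ definition above) =====
theorem new_method1_spec : Claim_equal_new_method1 := by
  intro a b _ hpre
  obtain ⟨ha, hb⟩ := hpre
  unfold Spec_new_method1 new_method1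
  have hsq : ((((a + b) * (a + b)).toNat : Nat) : Int) = (a + b) * (a + b) :=
    Int.toNat_of_nonneg (mul_self_nonneg _)
  rw [loop_eq a b ha hb _ 1 1 1 le_rfl le_rfl (by rw [alt_one_one]; exact alt_pos a b ha hb)
      (by rw [alt_one_one]; push_cast; rw [hsq]; linarith [alt_le_sq a b ha hb])]
  rw [alt_one_one]; ring
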